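-- pv_equiv track=rewrite | github.com/easyfly007/circuit_gcnn | netlistparser/util.py | gettokenlist
-- ===== SOURCE A (Python) =====
-- def gettokenlist(line):
--     tokens = line.split(' ')
--     return_list = []
--     for i in range(len(tokens)):
--         if tokens[i] == '=':
--             return_list.pop()
--             break
--         return_list.append(tokens[i])
--     return return_list
-- ===== SOURCE B (Python) =====
-- def gettokenlist(line):
--     tokens = line.split(' ')
--     if '=' in tokens:
--         result = tokens[:tokens.index('=')]
--         result.pop()
--         return result
--     return tokens
-- ===== Notes on version B (the rewrite author's own statement) =====
-- stated objective: simpler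
-- what changed: Replaces A's token-by-token accumulation loop with break/pop by computing the first '=' position and slicing the prefix (then popping its last element); no accumulator loop remains.
-- outside the precondition, e.g. on gettokenlist('='): A raises IndexError, B raises IndexError; on gettokenlist('= x'): A raises IndexError, B raises IndexError
import Mathlib
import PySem

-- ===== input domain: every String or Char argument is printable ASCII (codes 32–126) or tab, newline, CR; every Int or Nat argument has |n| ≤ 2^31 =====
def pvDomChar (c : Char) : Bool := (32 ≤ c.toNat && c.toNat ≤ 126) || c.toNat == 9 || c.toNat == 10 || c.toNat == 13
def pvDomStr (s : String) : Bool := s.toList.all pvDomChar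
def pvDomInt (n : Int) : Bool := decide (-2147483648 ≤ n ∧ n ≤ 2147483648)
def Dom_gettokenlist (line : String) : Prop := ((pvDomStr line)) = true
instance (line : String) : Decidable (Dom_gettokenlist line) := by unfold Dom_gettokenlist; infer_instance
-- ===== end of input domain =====

-- B computes the first '='-position and slices the prefix instead of A's accumulate-then-pop loop (simpler decomposition).
-- Pre_ excludes lines whose first space-token is '=': there Python A (and B) raise IndexError popping an empty list.


-- ===== PORT A =====
-- Python list.pop() on the accumulator: PySem.List.pop? returns none on []; A raises there (excluded by Pre_).
def pvPopLast (xs : List String) : List String :=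
  ((PySem.List.pop? xs (-1)).map Prod.snd).getD []

def pvLoopA : List String → List String → List String
  | [], acc => acc
  | t :: ts, acc =>
    if t = "=" then pvPopLast acc          -- pop() then break
    else pvLoopA ts (acc ++ [t])           -- return_list.append(tokens[i])

def gettokenlist (line : String) : List String :=
  let tokens := (PySem.Str.split? line " ").getD []
  pvLoopA tokens []

-- ===== PORT B =====
def gettokenlist_alt (line : String) : List String :=
  let tokens := (PySem.Str.split? line " ").getD []
  if "=" ∈ tokens then
    match PySem.List.index? tokens "=" with
    | some k => pvPopLast (PySem.List.slice tokens none (some (k : Int)))   -- result = tokens[:idx]; result.pop()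
    | none => tokens
  else tokens

-- ===== PRECONDITION & SPEC =====
-- Pre_ excludes exactly the lines whose first token is '=' (line = "=" or line starts with "= "): Python A raises IndexError there.
def Pre_gettokenlist (line : String) : Prop :=
  ¬ (line = "=" ∨ PySem.Str.startswith line "= " = true)
instance (line : String) : Decidable (Pre_gettokenlist line) := by unfold Pre_gettokenlist; infer_instance
def pvWitness_gettokenlist : String := "a b = c"

def Spec_gettokenlist (line : String) (out : List String) : Prop := out = gettokenlist_alt line
instance (line : String) (out : List String) : Decidable (Spec_gettokenlist line out) := by unfold Spec_gettokenlist; infer_instance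

-- ===== CLAIM =====
def Claim_equal_gettokenlist : Prop := ∀ (line : String), Dom_gettokenlist line → Pre_gettokenlist line → Spec_gettokenlist line (gettokenlist line)

-- ===== LEMMAS AND PROOFS =====
lemma pvLoopA_char (ts acc : List String) :
    pvLoopA ts acc =
      match PySem.List.index? ts "=" with
      | some k => pvPopLast (acc ++ ts.take k)
      | none => acc ++ ts := by
  induction ts generalizing acc with
  | nil => simp [pvLoopA, PySem.List.index?]
  | cons t ts ih =>
    by_cases h : t = "="
    · subst h
      rw [pvLoopA, if_pos rfl, PySem.List.index?_cons_self]
      simp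
    · rw [pvLoopA, if_neg h, ih, PySem.List.index?_cons_of_ne ts h]
      cases hk : PySem.List.index? ts "=" with
      | none => simp
      | some k => simp

theorem pv_equal (line : String) :
    gettokenlist line = gettokenlist_alt line := by
  unfold gettokenlist gettokenlist_alt
  set tokens := (PySem.Str.split? line " ").getD [] with htok
  rw [pvLoopA_char]
  by_cases hmem : "=" ∈ tokens
  · rw [if_pos hmem]
    rcases (PySem.List.index?_isSome_iff tokens "=").mpr hmem |> Option.isSome_iff_exists.mp with ⟨k, hk⟩
    rw [hk]
    simp only [List.nil_append]
    rw [PySem.List.slice_to_natCast]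
  · rw [if_neg hmem, (PySem.List.index?_eq_none_iff tokens "=").mpr hmem]
    simp

-- ===== VERDICT =====
theorem gettokenlist_spec : Claim_equal_gettokenlist := by
  intro line _ _
  unfold Spec_gettokenlist
  exact pv_equal line
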